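-- pv_equiv track=rewrite | github.com/22eming/sawol | Level3_공이동시뮬레이션.py | solution
-- ===== SOURCE A (Python) =====
-- def solution(n, m, x, y, queries):
--     x1, x2, y1, y2 = y, y, x, x  # x가 행.. y가 열..
--     for d, cnt in reversed(queries):
--         if d == 0:
--             if x1 != 0:
--                 x1 += cnt
--             x2 = x2+cnt if x2+cnt < m-1 else m-1
--             if x1 > m:
--                 return 0
--         elif d == 1:
--             if x2 != m-1:
--                 x2 -= cnt
--             x1 = x1-cnt if x1-cnt > 0 else 0
--             if x2 < 0:
--                 return 0
--         elif d == 2: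
--             if y1 != 0:
--                 y1 += cnt
--             y2 = y2+cnt if y2+cnt < n-1 else n-1
--             if y1 > n:
--                 return 0
--         elif d == 3:
--             if y2 != n-1:
--                 y2 -= cnt
--             y1 = y1-cnt if y1-cnt > 0 else 0
--             if y2 < 0:
--                 return 0
--     return (x2-x1+1)*(y2-y1+1)
-- ===== SOURCE B (Python) =====
-- def _axis_pass(rq, lo, hi, bound, d_plus, d_minus):
--     # One axis of the backward simulation; None means the interval collapsed.
--     for d, cnt in rq:
--         if d == d_plus:
--             if lo != 0:
--                 lo += cnt
--             hi = hi + cnt if hi + cnt < bound - 1 else bound - 1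
--             if lo > bound:
--                 return None
--         elif d == d_minus:
--             if hi != bound - 1:
--                 hi -= cnt
--             lo = lo - cnt if lo - cnt > 0 else 0
--             if hi < 0:
--                 return None
--     return (lo, hi)
--
-- def solution(n, m, x, y, queries):
--     rq = list(reversed(queries))
--     xs = _axis_pass(rq, y, y, m, 0, 1)
--     ys = _axis_pass(rq, x, x, n, 2, 3)
--     if xs is None or ys is None:
--         return 0
--     return (xs[1] - xs[0] + 1) * (ys[1] - ys[0] + 1)
-- ===== Notes on version B (the rewrite author's own statement) =====
-- stated objective: simpler
-- what changed: The single interleaved four-branch loop is decomposed into two independent passes of one shared generic axis helper (the x-interval from d in {0,1}, the y-interval from d in {2,3}), combined at the end.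
import Mathlib
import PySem

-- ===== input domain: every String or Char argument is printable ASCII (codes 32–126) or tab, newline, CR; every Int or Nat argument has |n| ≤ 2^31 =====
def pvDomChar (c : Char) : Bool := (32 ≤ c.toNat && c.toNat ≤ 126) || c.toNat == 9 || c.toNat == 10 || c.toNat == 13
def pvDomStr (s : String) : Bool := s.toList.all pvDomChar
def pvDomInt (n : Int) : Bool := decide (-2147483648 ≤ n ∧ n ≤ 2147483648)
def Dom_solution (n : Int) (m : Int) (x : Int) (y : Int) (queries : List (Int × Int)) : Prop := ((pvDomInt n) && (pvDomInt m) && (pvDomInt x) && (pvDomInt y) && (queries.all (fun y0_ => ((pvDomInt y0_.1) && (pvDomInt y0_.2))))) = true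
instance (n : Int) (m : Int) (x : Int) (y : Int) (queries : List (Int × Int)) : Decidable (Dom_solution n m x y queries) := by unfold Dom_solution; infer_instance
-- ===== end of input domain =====

-- B decomposes A's single interleaved four-branch loop into two independent passes of one
-- shared generic axis helper (x from d∈{0,1}, y from d∈{2,3}); same results, simpler shape.

-- ===== PORT A =====
-- literal port of A's loop over reversed(queries); early 'return 0' becomes returning 0.
def solLoopA (n m : Int) : List (Int × Int) → Int → Int → Int → Int → Int
  | [], x1, x2, y1, y2 => (x2 - x1 + 1) * (y2 - y1 + 1)
  | (d, cnt) :: rest, x1, x2, y1, y2 =>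
    if d = 0 then
      let x1' := if x1 ≠ 0 then x1 + cnt else x1
      let x2' := if x2 + cnt < m - 1 then x2 + cnt else m - 1
      if x1' > m then 0 else solLoopA n m rest x1' x2' y1 y2
    else if d = 1 then
      let x2' := if x2 ≠ m - 1 then x2 - cnt else x2
      let x1' := if x1 - cnt > 0 then x1 - cnt else 0
      if x2' < 0 then 0 else solLoopA n m rest x1' x2' y1 y2
    else if d = 2 then
      let y1' := if y1 ≠ 0 then y1 + cnt else y1
      let y2' := if y2 + cnt < n - 1 then y2 + cnt else n - 1
      if y1' > n then 0 else solLoopA n m rest x1 x2 y1' y2'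
    else if d = 3 then
      let y2' := if y2 ≠ n - 1 then y2 - cnt else y2
      let y1' := if y1 - cnt > 0 then y1 - cnt else 0
      if y2' < 0 then 0 else solLoopA n m rest x1 x2 y1' y2'
    else solLoopA n m rest x1 x2 y1 y2

def solution (n : Int) (m : Int) (x : Int) (y : Int) (queries : List (Int × Int)) : Int :=
  solLoopA n m queries.reverse y y x x

-- ===== PORT B =====
-- _axis_pass from Source B: one axis of the backward simulation; none = interval collapsed.
def axisPass (bound dPlus dMinus : Int) : List (Int × Int) → Int → Int → Option (Int × Int)
  | [], lo, hi => some (lo, hi)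
  | (d, cnt) :: rest, lo, hi =>
    if d = dPlus then
      let lo' := if lo ≠ 0 then lo + cnt else lo
      let hi' := if hi + cnt < bound - 1 then hi + cnt else bound - 1
      if lo' > bound then none else axisPass bound dPlus dMinus rest lo' hi'
    else if d = dMinus then
      let hi' := if hi ≠ bound - 1 then hi - cnt else hi
      let lo' := if lo - cnt > 0 then lo - cnt else 0
      if hi' < 0 then none else axisPass bound dPlus dMinus rest lo' hi'
    else axisPass bound dPlus dMinus rest lo hi

def solution_alt (n : Int) (m : Int) (x : Int) (y : Int) (queries : List (Int × Int)) : Int :=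
  let rq := queries.reverse
  match axisPass m 0 1 rq y y, axisPass n 2 3 rq x x with
  | some (a, b), some (c, d) => (b - a + 1) * (d - c + 1)
  | _, _ => 0

-- ===== PRECONDITION & SPEC =====
def Spec_solution (n : Int) (m : Int) (x : Int) (y : Int) (queries : List (Int × Int)) (out : Int) : Prop := out = solution_alt n m x y queries
instance (n : Int) (m : Int) (x : Int) (y : Int) (queries : List (Int × Int)) (out : Int) : Decidable (Spec_solution n m x y queries out) := by unfold Spec_solution; infer_instance

-- ===== CLAIM (what is proved, stated in full; the proofs are below) =====
def Claim_equal_solution : Prop := ∀ (n : Int) (m : Int) (x : Int) (y : Int) (queries : List (Int × Int)), Dom_solution n m x y queries → Spec_solution n m x y queries (solution n m x y queries)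

-- ===== LEMMAS AND PROOFS =====

-- A's interleaved loop equals the combination of the two independent axis passes.
theorem solLoopA_eq_passes (n m : Int) (qs : List (Int × Int)) (x1 x2 y1 y2 : Int) :
    solLoopA n m qs x1 x2 y1 y2 =
      match axisPass m 0 1 qs x1 x2, axisPass n 2 3 qs y1 y2 with
      | some (a, b), some (c, d) => (b - a + 1) * (d - c + 1)
      | _, _ => 0 := by
  induction qs generalizing x1 x2 y1 y2 with
  | nil => simp [solLoopA, axisPass]
  | cons q rest ih =>
    obtain ⟨d, cnt⟩ := q
    by_cases h0 : d = 0
    · subst h0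
      simp only [solLoopA, axisPass]
      norm_num
      split_ifs <;> simp [ih]
    · by_cases h1 : d = 1
      · subst h1
        simp only [solLoopA, axisPass]
        norm_num
        split_ifs <;> simp [ih]
      · by_cases h2 : d = 2
        · subst h2
          simp only [solLoopA, axisPass]
          norm_num
          split_ifs <;> cases haxp : axisPass m 0 1 rest x1 x2 <;> simp [ih, haxp]
        · by_cases h3 : d = 3
          · subst h3
            simp only [solLoopA, axisPass]
            norm_num
            split_ifs <;> cases haxp : axisPass m 0 1 rest x1 x2 <;> simp [ih, haxp]
          · simp only [solLoopA, axisPass, if_neg h0, if_neg h1, if_neg h2, if_neg h3]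
            exact ih x1 x2 y1 y2

-- ===== VERDICT (by name: the statement is the Claim_ definition above) =====
theorem solution_spec : Claim_equal_solution := by
  intro n m x y queries _
  unfold Spec_solution solution solution_alt
  exact solLoopA_eq_passes n m queries.reverse y y x x
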